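-- pv_equiv track=rewrite | github.com/chenxu10/kata | fundamentals/blackjack_fun_learn.py | optimal_strategy
-- ===== SOURCE A (Python) =====
-- def card_value(card):
--     """
--     Calculate the numerical value of a card.
--
--     Args:
--     card (str): A string representing the card ('2' to '10', 'J', 'Q', 'K', or 'A')
--
--     Returns:
--     int: The numerical value of the card (2-11)
--     """
--     if card in ['J', 'Q', 'K']:
--         return 10
--     elif card == 'A':
--         return 11
--     else:
--         return int(card)
--
-- def dealer_final_hand(initial_card):
--     """
--     Simulate the dealer's final hand value based on their initial card.
--
--     Args:
--     initial_card (str): The dealer's initial card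
--
--     Returns:
--     int: The final value of the dealer's hand (17-21)
--     """
--     total = card_value(initial_card)
--     while total < 17:
--         total += 7  # Simplified: assume dealer draws a 7 (average card)
--     return min(total, 21)
--
-- def calculate_stand_value(dealer_hand, player_sum):
--     """
--     Calculate the outcome of standing with the current hand.
--
--     Args:
--     dealer_hand (int): The dealer's final hand value
--     player_sum (int): The player's current hand value
--
--     Returns:
--     int: 1 if player wins, -1 if dealer wins, 0 if it's a tie
--     """
--     if player_sum > 21:
--         return -1
--     if dealer_hand > 21:
--         return 1
--     if dealer_hand > player_sum:
--         return -1
--     if player_sum > dealer_hand: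
--         return 1
--     return 0
--
-- def optimal_strategy(deck):
--     """
--     Calculate the optimal strategy for the given deck using dynamic programming.
--
--     Args:
--     deck (list): A list of cards representing the current deck
--
--     Returns:
--     float: The expected value of playing optimally from the start of the deck
--     """
--     n = len(deck)
--     dp = [0] * (n + 1)
--
--     for i in range(n - 1, -1, -1):
--         player_sum = 0
--         dealer_card = deck[i]
--         j = i
--
--         # Stand immediately
--         dealer_hand = dealer_final_hand(dealer_card)
--         stand_value = calculate_stand_value(dealer_hand, player_sum)
--         best_value = stand_value
--
--         # Try hitting
--         while j < n and player_sum <= 21: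
--             player_sum += card_value(deck[j])
--             j += 1
--             if player_sum > 21:
--                 hit_value = -1
--             else:
--                 hit_value = calculate_stand_value(dealer_final_hand(dealer_card), player_sum) + dp[j]
--             best_value = max(best_value, hit_value)
--
--         dp[i] = best_value
--
--     return dp[0]
-- ===== SOURCE B (Python) =====
-- def card_value(card):
--     if card in ['J', 'Q', 'K']:
--         return 10
--     elif card == 'A':
--         return 11
--     else:
--         return int(card)
--
-- def dealer_final_hand(initial_card):
--     total = card_value(initial_card)
--     while total < 17:
--         total += 7
--     return min(total, 21)
--
-- def calculate_stand_value(dealer_hand, player_sum):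
--     if player_sum > 21:
--         return -1
--     if dealer_hand > 21:
--         return 1
--     if dealer_hand > player_sum:
--         return -1
--     if player_sum > dealer_hand:
--         return 1
--     return 0
--
-- def optimal_strategy(deck):
--     n = len(deck)
--     memo = {}
--
--     def best(i):
--         if i >= n:
--             return 0
--         if i in memo:
--             return memo[i]
--         dealer_hand = dealer_final_hand(deck[i])
--         value = calculate_stand_value(dealer_hand, 0)
--         player_sum = 0
--         j = i
--         while j < n and player_sum <= 21:
--             player_sum += card_value(deck[j])
--             j += 1
--             if player_sum > 21:
--                 hit = -1
--             else:
--                 hit = calculate_stand_value(dealer_hand, player_sum) + best(j)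
--             value = max(value, hit)
--         memo[i] = value
--         return value
--
--     return best(0)
-- ===== Notes on version B (the rewrite author's own statement) =====
-- stated objective: alternative
-- what changed: Replaced the backward-filled dp array with a top-down memoized recursion best(i) over the deck index (memo dict keyed on i, 0 at the terminal case), keeping the helper functions unchanged.
import Mathlib
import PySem

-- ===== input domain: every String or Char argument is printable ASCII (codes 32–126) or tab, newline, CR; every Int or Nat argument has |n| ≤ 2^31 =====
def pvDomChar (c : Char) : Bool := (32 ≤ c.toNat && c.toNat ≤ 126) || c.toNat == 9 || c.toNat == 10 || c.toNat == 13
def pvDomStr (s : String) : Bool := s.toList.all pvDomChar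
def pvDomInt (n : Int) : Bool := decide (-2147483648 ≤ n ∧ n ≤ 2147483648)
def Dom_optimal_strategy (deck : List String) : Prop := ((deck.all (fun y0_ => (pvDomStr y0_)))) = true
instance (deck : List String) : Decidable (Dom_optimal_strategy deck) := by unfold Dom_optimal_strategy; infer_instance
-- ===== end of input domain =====

-- B replaces A's backward-filled dp array with a top-down memoized recursion over the deck index (same cost, different decomposition); return value only, no mutation involved.


-- ===== PORT A =====
-- card_value: int(card) is PySem.Int.ofStr?; Pre_ excludes the decks where it raises ValueError, so the .getD 0 default is never reached under Pre_.
def cardValue (card : String) : Int :=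
  if card = "J" ∨ card = "Q" ∨ card = "K" then 10
  else if card = "A" then 11
  else (PySem.Int.ofStr? card).getD 0

-- the 'while total < 17: total += 7' loop of dealer_final_hand
def dealerLoop (total : Int) : Int :=
  if total < 17 then dealerLoop (total + 7) else total
termination_by (17 - total).toNat
decreasing_by omega

def dealerFinalHand (initial_card : String) : Int :=
  min (dealerLoop (cardValue initial_card)) 21

def standValue (dealer_hand player_sum : Int) : Int :=
  if player_sum > 21 then -1
  else if dealer_hand > 21 then 1
  else if dealer_hand > player_sum then -1
  else if player_sum > dealer_hand then 1
  else 0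

-- A's inner 'while j < n and player_sum <= 21' loop (dealer_final_hand(dealer_card) recomputed each pass, exactly as in A);
-- deck.getD j "" / dp.getD (j+1) 0 are deck[j] / dp[j]: the guard j < n keeps both indices in range, as in Python
def hitLoopA (deck : List String) (dp : List Int) (dc : String) (n j : Nat) (ps best : Int) : Int :=
  if _h : j < n ∧ ps ≤ 21 then
    let ps' := ps + cardValue (deck.getD j "")
    let hit := if ps' > 21 then (-1 : Int) else standValue (dealerFinalHand dc) ps' + dp.getD (j + 1) 0
    hitLoopA deck dp dc n (j + 1) ps' (max best hit)
  else best
termination_by n - j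
decreasing_by omega

-- body of one iteration of A's 'for i in range(n-1, -1, -1)' loop
def bodyA (deck : List String) (n : Nat) (dp : List Int) (i : Nat) : Int :=
  let dc := deck.getD i ""
  let dh := dealerFinalHand dc
  hitLoopA deck dp dc n i 0 (standValue dh 0)

-- the outer loop: dp[i] = best_value for i = k-1, k-2, …, 0
def outerA (deck : List String) (n : Nat) : Nat → List Int → List Int
  | 0, dp => dp
  | k + 1, dp => outerA deck n k (dp.set k (bodyA deck n dp k))

def optimal_strategy (deck : List String) : Int :=
  let n := deck.length
  (outerA deck n n (List.replicate (n + 1) (0 : Int))).getD 0 0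

-- ===== PORT B =====
-- top-down memoized recursion best(i) (Source B), the memo dict threaded through the calls
mutual
def bestB (deck : List String) (n i : Nat) (memo : PySem.Dict Int Int) : Int × PySem.Dict Int Int :=
  if n ≤ i then (0, memo)
  else
    match memo.get? (i : Int) with
    | some v => (v, memo)
    | none =>
      let dh := dealerFinalHand (deck.getD i "")
      let r := hitB deck n dh i 0 (standValue dh 0) memo
      (r.1, r.2.insert (i : Int) r.1)
termination_by 2 * (n - i) + 1
decreasing_by all_goals omega

def hitB (deck : List String) (n : Nat) (dh : Int) (j : Nat) (ps best : Int) (memo : PySem.Dict Int Int) : Int × PySem.Dict Int Int :=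
  if _h : j < n ∧ ps ≤ 21 then
    let ps' := ps + cardValue (deck.getD j "")
    if ps' > 21 then hitB deck n dh (j + 1) ps' (max best (-1)) memo
    else
      let r := bestB deck n (j + 1) memo
      hitB deck n dh (j + 1) ps' (max best (standValue dh ps' + r.1)) r.2
  else (best, memo)
termination_by 2 * (n - j)
decreasing_by all_goals omega
end

def optimal_strategy_alt (deck : List String) : Int :=
  (bestB deck deck.length 0 PySem.Dict.empty).1

-- ===== PRECONDITION & SPEC =====
-- Pre_ excludes exactly the decks containing a card that is neither J/Q/K/A nor an int()-parsable string: on those Python A raises ValueError.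
def Pre_optimal_strategy (deck : List String) : Prop :=
  ∀ c ∈ deck, c = "J" ∨ c = "Q" ∨ c = "K" ∨ c = "A" ∨ (PySem.Int.ofStr? c).isSome = true
instance (deck : List String) : Decidable (Pre_optimal_strategy deck) := by unfold Pre_optimal_strategy; infer_instance

def pvWitness_optimal_strategy : List String := ["A", "10", "K", "7"]

def Spec_optimal_strategy (deck : List String) (out : Int) : Prop := out = optimal_strategy_alt deck
instance (deck : List String) (out : Int) : Decidable (Spec_optimal_strategy deck out) := by unfold Spec_optimal_strategy; infer_instance

-- ===== CLAIM (what is proved, stated in full; the proofs are below) =====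
def Claim_equal_optimal_strategy : Prop := ∀ (deck : List String), Dom_optimal_strategy deck → Pre_optimal_strategy deck → Spec_optimal_strategy deck (optimal_strategy deck)

-- ===== LEMMAS AND PROOFS =====

-- the common mathematical value of both programs: a pure (memo-free, array-free) version of the recursion
mutual
def bestP (deck : List String) (n i : Nat) : Int :=
  if n ≤ i then 0
  else
    let dh := dealerFinalHand (deck.getD i "")
    hitP deck n dh i 0 (standValue dh 0)
termination_by 2 * (n - i) + 1
decreasing_by all_goals omega

def hitP (deck : List String) (n : Nat) (dh : Int) (j : Nat) (ps best : Int) : Int :=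
  if _h : j < n ∧ ps ≤ 21 then
    let ps' := ps + cardValue (deck.getD j "")
    if ps' > 21 then hitP deck n dh (j + 1) ps' (max best (-1))
    else hitP deck n dh (j + 1) ps' (max best (standValue dh ps' + bestP deck n (j + 1)))
  else best
termination_by 2 * (n - j)
decreasing_by all_goals omega
end

-- A side: the inner loop over a dp list that already carries bestP values at the indices it reads computes hitP
lemma hitLoopA_eq_hitP (deck : List String) (dp : List Int) (dc : String) (n : Nat) :
    ∀ (fuel j : Nat) (ps best : Int), n - j ≤ fuel →
      (∀ m : Nat, j < m → m ≤ n → dp.getD m 0 = bestP deck n m) →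
      hitLoopA deck dp dc n j ps best = hitP deck n (dealerFinalHand dc) j ps best := by
  intro fuel
  induction fuel with
  | zero =>
    intro j ps best hf _
    rw [hitLoopA, hitP, dif_neg (by omega), dif_neg (by omega)]
  | succ f ih =>
    intro j ps best hf hdp
    by_cases hc : j < n ∧ ps ≤ 21
    · rw [hitLoopA, hitP, dif_pos hc, dif_pos hc]
      dsimp only
      by_cases hb : ps + cardValue (deck.getD j "") > 21
      · rw [if_pos hb, if_pos hb]
        exact ih _ _ _ (by omega) (fun m h1 h2 => hdp m (by omega) h2)
      · rw [if_neg hb, if_neg hb, hdp (j + 1) (by omega) (by omega)]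
        exact ih _ _ _ (by omega) (fun m h1 h2 => hdp m (by omega) h2)
    · rw [hitLoopA, hitP, dif_neg hc, dif_neg hc]

lemma bodyA_eq_bestP (deck : List String) (n : Nat) (dp : List Int) (i : Nat) (hi : i < n)
    (hdp : ∀ m : Nat, i < m → m ≤ n → dp.getD m 0 = bestP deck n m) :
    bodyA deck n dp i = bestP deck n i := by
  rw [bodyA, bestP, if_neg (by omega)]
  dsimp only
  exact hitLoopA_eq_hitP deck dp _ n (n - i) i 0 _ le_rfl hdp

lemma getD_set' (dp : List Int) (k m : Nat) (v : Int) (h : k < dp.length) :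
    (dp.set k v).getD m 0 = if m = k then v else dp.getD m 0 := by
  by_cases hmk : m = k
  · subst hmk; simp [List.getD, List.getElem?_set_self h]
  · simp [List.getD, List.getElem?_set_ne (Ne.symm hmk), hmk]

-- A side: invariant of the backward fill — after processing indices k-1 … 0 every slot ≤ n holds bestP
lemma outerA_getD (deck : List String) (n : Nat) :
    ∀ (k : Nat) (dp : List Int), k ≤ n → dp.length = n + 1 →
      (∀ m : Nat, k ≤ m → m ≤ n → dp.getD m 0 = bestP deck n m) →
      ∀ m : Nat, m ≤ n → (outerA deck n k dp).getD m 0 = bestP deck n m := by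
  intro k
  induction k with
  | zero =>
    intro dp _ _ hdp m hm
    exact hdp m (Nat.zero_le m) hm
  | succ k ih =>
    intro dp hk hlen hdp m hm
    rw [outerA]
    have hkv : ∀ m : Nat, k ≤ m → m ≤ n → (dp.set k (bodyA deck n dp k)).getD m 0 = bestP deck n m := by
      intro m hkm hmn
      rw [getD_set' dp k m _ (by omega)]
      by_cases hmk : m = k
      · rw [if_pos hmk]
        subst hmk
        exact bodyA_eq_bestP deck n dp m (by omega) (fun m' h1 h2 => hdp m' (by omega) h2)
      · rw [if_neg hmk]
        exact hdp m (by omega) hmn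
    exact ih _ (by omega) (by simpa using hlen) hkv m hm

lemma optA_eq_bestP (deck : List String) : optimal_strategy deck = bestP deck deck.length 0 := by
  rw [optimal_strategy]
  refine outerA_getD deck deck.length deck.length _ le_rfl (by simp) ?_ 0 (Nat.zero_le _)
  intro m h1 h2
  have hm : m = deck.length := le_antisymm h2 h1
  subst hm
  rw [bestP, if_pos le_rfl]
  simp [List.getD]

-- B side: every value stored in the memo is the bestP value of its index
def ValidMemo (deck : List String) (n : Nat) (memo : PySem.Dict Int Int) : Prop :=
  ∀ (i : Nat) (v : Int), memo.get? (i : Int) = some v → v = bestP deck n i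

lemma combinedB (deck : List String) (n : Nat) : ∀ fuel : Nat,
    (∀ (i : Nat) (memo : PySem.Dict Int Int), 2 * (n - i) + 1 ≤ fuel → ValidMemo deck n memo →
      (bestB deck n i memo).1 = bestP deck n i ∧ ValidMemo deck n (bestB deck n i memo).2) ∧
    (∀ (dh : Int) (j : Nat) (ps best : Int) (memo : PySem.Dict Int Int), 2 * (n - j) ≤ fuel →
      ValidMemo deck n memo →
      (hitB deck n dh j ps best memo).1 = hitP deck n dh j ps best ∧
        ValidMemo deck n (hitB deck n dh j ps best memo).2) := by
  intro fuel
  induction fuel with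
  | zero =>
    constructor
    · intro i memo hf
      exact absurd hf (by omega)
    · intro dh j ps best memo hf hv
      have hj : ¬ (j < n ∧ ps ≤ 21) := by omega
      rw [hitB, dif_neg hj, hitP, dif_neg hj]
      exact ⟨rfl, hv⟩
  | succ f ih =>
    constructor
    · intro i memo hf hv
      rw [bestB]
      by_cases hni : n ≤ i
      · rw [if_pos hni, bestP, if_pos hni]
        exact ⟨rfl, hv⟩
      · rw [if_neg hni]
        rcases hg : memo.get? (i : Int) with _ | v
        · dsimp only
          have hr := ih.2 (dealerFinalHand (deck.getD i "")) i 0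
            (standValue (dealerFinalHand (deck.getD i "")) 0) memo (by omega) hv
          refine ⟨?_, ?_⟩
          · rw [hr.1, bestP, if_neg hni]
          · intro m w hw
            rw [PySem.Dict.get?_insert] at hw
            by_cases hmi : (m : Int) = (i : Int)
            · rw [if_pos hmi] at hw
              have : m = i := by exact_mod_cast hmi
              subst this
              cases hw
              rw [hr.1, bestP, if_neg hni]
            · rw [if_neg hmi] at hw
              exact hr.2 m w hw
        · dsimp only
          exact ⟨hv i v hg, hv⟩
    · intro dh j ps best memo hf hv
      by_cases hc : j < n ∧ ps ≤ 21
      · rw [hitB, dif_pos hc, hitP, dif_pos hc]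
        dsimp only
        by_cases hb : ps + cardValue (deck.getD j "") > 21
        · rw [if_pos hb, if_pos hb]
          exact ih.2 dh (j + 1) _ _ memo (by omega) hv
        · rw [if_neg hb, if_neg hb]
          have hbst := ih.1 (j + 1) memo (by omega) hv
          rw [hbst.1]
          exact ih.2 dh (j + 1) _ _ _ (by omega) hbst.2
      · rw [hitB, dif_neg hc, hitP, dif_neg hc]
        exact ⟨rfl, hv⟩

lemma optB_eq_bestP (deck : List String) : optimal_strategy_alt deck = bestP deck deck.length 0 := by
  rw [optimal_strategy_alt]
  exact ((combinedB deck deck.length (2 * deck.length + 1)).1 0 PySem.Dict.empty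
    (by omega) (by intro i v hv; simp [PySem.Dict.get?_empty] at hv)).1

-- ===== VERDICT (by name: the statement is the Claim_ definition above) =====
theorem optimal_strategy_spec : Claim_equal_optimal_strategy := by
  intro deck _ _
  unfold Spec_optimal_strategy
  rw [optA_eq_bestP, optB_eq_bestP]
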